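-- pv_equiv track=rewrite | github.com/TGouriSankar/AI_Powered_Object_Detection_with_Audio_Feedback | app.py | generate_text_from_objects
-- ===== SOURCE A (Python) =====
-- def generate_text_from_objects(object_counts):
--     response = "This picture contains"
--     labels = list(object_counts.keys())
--     for i, label in enumerate(labels):
--         count = object_counts[label]
--         response += f" {count} {label}"
--         if count > 1:
--             response += "s"
--         if i < len(labels) - 2:
--             response += ","
--         elif i == len(labels) - 2:
--             response += " and"
--     response += "."
--     return response
-- ===== SOURCE B (Python) =====
-- def generate_text_from_objects(object_counts):
--     parts = [f"{count} {label}" + ("s" if count > 1 else "")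
--              for label, count in object_counts.items()]
--     if not parts:
--         return "This picture contains."
--     if len(parts) == 1:
--         return "This picture contains " + parts[0] + "."
--     return ("This picture contains " + ", ".join(parts[:-1])
--             + " and " + parts[-1] + ".")
-- ===== Notes on version B (the rewrite author's own statement) =====
-- stated objective: idiomatic
-- what changed: Replaces the index-counting loop with positional separator conditionals by a build-then-assemble decomposition: a list of per-object phrases, then ', '.join of all but the last joined to the last with ' and '.
import Mathlib
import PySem

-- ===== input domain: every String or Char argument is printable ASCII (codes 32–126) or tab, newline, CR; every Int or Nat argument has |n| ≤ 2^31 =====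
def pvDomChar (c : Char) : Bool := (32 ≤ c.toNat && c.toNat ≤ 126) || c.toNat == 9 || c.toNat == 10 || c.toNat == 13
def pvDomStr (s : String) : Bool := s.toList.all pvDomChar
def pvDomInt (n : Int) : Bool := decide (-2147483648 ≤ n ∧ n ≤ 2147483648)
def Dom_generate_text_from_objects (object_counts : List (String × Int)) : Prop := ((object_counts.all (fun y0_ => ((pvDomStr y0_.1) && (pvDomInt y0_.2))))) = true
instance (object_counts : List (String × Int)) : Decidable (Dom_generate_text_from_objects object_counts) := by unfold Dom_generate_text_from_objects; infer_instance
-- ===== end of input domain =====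

-- B replaces A's index-counting loop by an idiomatic build-phrases-then-join assembly; return values proved equal on all inputs.


-- ===== PORT A =====
def generate_text_from_objects (object_counts : List (String × Int)) : String :=
  let d := PySem.Dict.ofList object_counts
  let response := "This picture contains"
  let labels := d.keys
  let response := (PySem.List.enumerate labels).foldl (fun response il =>
    let count := d.getD il.2 0
    let response := response ++ " " ++ PySem.Int.toStr count ++ " " ++ il.2
    let response := if count > 1 then response ++ "s" else response
    if il.1 < PySem.List.len labels - 2 then response ++ ","
    else if il.1 = PySem.List.len labels - 2 then response ++ " and"
    else response) response
  response ++ "."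

-- ===== PORT B =====
def generate_text_from_objects_alt (object_counts : List (String × Int)) : String :=
  let parts := (PySem.Dict.ofList object_counts).items.map (fun lc =>
    PySem.Int.toStr lc.2 ++ " " ++ lc.1 ++ (if lc.2 > 1 then "s" else ""))
  if parts = [] then "This picture contains."
  else if parts.length = 1 then
    "This picture contains " ++ PySem.List.pyGetD parts 0 "" ++ "."
  else
    "This picture contains " ++ PySem.Str.join ", " (PySem.List.slice parts none (some (-1)))
      ++ " and " ++ PySem.List.pyGetD parts (-1) "" ++ "."

-- ===== PRECONDITION & SPEC =====
def Spec_generate_text_from_objects (object_counts : List (String × Int)) (out : String) : Prop := out = generate_text_from_objects_alt object_counts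
instance (object_counts : List (String × Int)) (out : String) : Decidable (Spec_generate_text_from_objects object_counts out) := by unfold Spec_generate_text_from_objects; infer_instance

-- ===== CLAIM (what is proved, stated in full; the proofs are below) =====
def Claim_equal_generate_text_from_objects : Prop := ∀ (object_counts : List (String × Int)), Dom_generate_text_from_objects object_counts → Spec_generate_text_from_objects object_counts (generate_text_from_objects object_counts)

-- ===== LEMMAS AND PROOFS =====

-- A's per-iteration separator, as a function of the position and the total length
def pvSep (i n : Int) : String := if i < n - 2 then "," else if i = n - 2 then " and" else ""

-- the text A's loop appends after "This picture contains", as a recursion on the phrase list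
def pvBody : List String → String
  | [] => ""
  | [p] => " " ++ p
  | p :: q :: t => " " ++ p ++ (if t.isEmpty then " and" else ",") ++ pvBody (q :: t)

lemma pvEnumerate_cons {α : Type} (x : α) (t : List α) (k : Int) :
    PySem.List.enumerate (x :: t) k = (k, x) :: PySem.List.enumerate t (k + 1) := rfl

-- A's loop over an enumerated list equals pvBody of the phrase list
lemma pvLoop_eq (f : String → String) :
    ∀ (xs : List String) (k n : Int) (init : String), n = k + xs.length →
      (PySem.List.enumerate xs k).foldl
        (fun r il => (r ++ " " ++ f il.2) ++ pvSep il.1 n) init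
      = init ++ pvBody (xs.map f) := by
  intro xs
  induction xs with
  | nil => intro k n init h; simp [PySem.List.enumerate, pvBody, String.append_empty]
  | cons x t ih =>
    intro k n init h
    rw [pvEnumerate_cons, List.foldl_cons,
        ih (k + 1) n ((init ++ " " ++ f x) ++ pvSep k n) (by simp at h ⊢; omega)]
    cases t with
    | nil =>
      have hs : pvSep k n = "" := by
        simp only [pvSep]; simp at h
        rw [if_neg (by omega), if_neg (by omega)]
      simp [hs, pvBody, String.append_empty, String.append_assoc]
    | cons y t' =>
      cases t' with
      | nil =>
        have hs : pvSep k n = " and" := by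
          simp only [pvSep]; simp at h
          rw [if_neg (by omega), if_pos (by omega)]
        simp [hs, pvBody, String.append_assoc]
      | cons z t'' =>
        have hs : pvSep k n = "," := by
          simp only [pvSep]; simp at h
          rw [if_pos (by omega)]
        simp [hs, pvBody, String.append_assoc]

lemma pvJoin_cons_cons (sep x y : String) (r : List String) :
    PySem.Str.join sep (x :: y :: r) = x ++ sep ++ PySem.Str.join sep (y :: r) := by
  apply String.toList_inj.mp
  simp [PySem.Str.toList_join, PySem.Chars.join, String.toList_append, List.intercalate]

lemma pvJoin_singleton (sep x : String) : PySem.Str.join sep [x] = x := by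
  apply String.toList_inj.mp
  simp [PySem.Str.toList_join, PySem.Chars.join, List.intercalate]

-- pvBody of a list of length ≥ 2 is B's join-with-and assembly (with a leading space)
lemma pvBody_join : ∀ (t : List String) (p : String) (h : t ≠ []),
    pvBody (p :: t) = " " ++ (PySem.Str.join ", " ((p :: t).dropLast) ++ " and "
      ++ (p :: t).getLast (List.cons_ne_nil p t)) := by
  intro t
  induction t with
  | nil => intro p h; exact absurd rfl h
  | cons q t' ih =>
    intro p h
    cases t' with
    | nil =>
      have h1 : (" and" : String) ++ " " = " and " := by decide
      simp [pvBody, List.dropLast, pvJoin_singleton, List.getLast, ← String.append_assoc]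
      rw [String.append_assoc, h1]
    | cons z t'' =>
      have h1 : ("," : String) ++ " " = ", " := by decide
      have hd : (p :: q :: z :: t'').dropLast = p :: (q :: z :: t'').dropLast := rfl
      have hl : (p :: q :: z :: t'').getLast (List.cons_ne_nil _ _)
              = (q :: z :: t'').getLast (List.cons_ne_nil _ _) := rfl
      have hd2 : (q :: z :: t'').dropLast = q :: (z :: t'').dropLast := rfl
      rw [hd, hl, hd2, pvJoin_cons_cons]
      show " " ++ p ++ "," ++ pvBody (q :: z :: t'') = _
      rw [ih q (by simp)]
      rw [hd2]
      simp [← String.append_assoc]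
      rw [String.append_assoc, h1]

theorem pv_main (object_counts : List (String × Int)) :
    generate_text_from_objects object_counts = generate_text_from_objects_alt object_counts := by
  unfold generate_text_from_objects generate_text_from_objects_alt
  simp only []
  set d := PySem.Dict.ofList object_counts with hd
  have hnd : d.keys.Nodup := PySem.Dict.nodup_keys_ofList object_counts
  have hitems : d.items = d.keys.map (fun k => (k, d.getD k 0)) :=
    PySem.Dict.items_eq_map_keys d hnd 0
  set f : String → String :=
    fun k => PySem.Int.toStr (d.getD k 0) ++ " " ++ k ++ (if d.getD k 0 > 1 then "s" else "")
    with hf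
  have hparts : (d.items.map (fun lc =>
      PySem.Int.toStr lc.2 ++ " " ++ lc.1 ++ (if lc.2 > 1 then "s" else "")))
      = d.keys.map f := by
    rw [hitems, List.map_map]; rfl
  have hfun : (fun (r : String) (il : Int × String) =>
      let count := d.getD il.2 0
      let response := r ++ " " ++ PySem.Int.toStr count ++ " " ++ il.2
      let response := if count > 1 then response ++ "s" else response
      if il.1 < PySem.List.len d.keys - 2 then response ++ ","
      else if il.1 = PySem.List.len d.keys - 2 then response ++ " and"
      else response)
    = (fun r il => (r ++ " " ++ f il.2) ++ pvSep il.1 d.keys.length) := by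
    funext r il
    simp only [hf, pvSep, PySem.List.len_eq]
    split_ifs <;> simp [String.append_assoc, String.append_empty]
  rw [hfun, hparts,
      pvLoop_eq f d.keys 0 d.keys.length "This picture contains" (by simp)]
  cases hk : d.keys.map f with
  | nil => simp [pvBody]
  | cons p t =>
    cases t with
    | nil =>
      have h1 : ("This picture contains" : String) ++ " " = "This picture contains " := by decide
      simp [pvBody, PySem.List.pyGetD_zero_cons, ← String.append_assoc, h1]
    | cons q t' =>
      rw [pvBody_join (q :: t') p (by simp)]
      have h1 : ("This picture contains" : String) ++ " " = "This picture contains " := by decide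
      rw [if_neg (by simp), if_neg (by simp)]
      rw [PySem.List.slice_to_neg_one, PySem.List.pyGetD_neg_one _ _ (List.cons_ne_nil _ _)]
      simp [← String.append_assoc, h1]

-- ===== VERDICT (by name: the statement is the Claim_ definition above) =====
theorem generate_text_from_objects_spec : Claim_equal_generate_text_from_objects := by
  intro oc _
  exact pv_main oc
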